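-- pv_equiv track=rewrite | github.com/bensonalec/AdventOfCode2020 | daySixteen/daySixteen.py | removeInvalidTickets
-- ===== SOURCE A (Python) =====
-- def removeInvalidTickets(newRules,your,neList):
--     validTickets = []
--     for tick in neList:
--         if(tick != []):
--             valid = True
--             for value in tick:
--                 validCount = 0
--                 for ru in newRules:
--                     ruleSetOne = ru[0]
--                     ruleSetTwo = ru[1]
--                     for rs in ru:
--                         if(rs[0] <= value <= rs[1]):
--                             validCount+=1
--                 if(validCount == 0):
--                     valid = False
--             if(valid == True):
--                 validTickets.append(tick)
--     return validTickets
-- ===== SOURCE B (Python) =====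
-- def removeInvalidTickets(newRules, your, neList):
--     # Merge all rule ranges into disjoint sorted intervals once, then binary-search each value.
--     spans = [(rs[0], rs[1]) for ru in newRules for rs in ru]
--     spans = [p for p in spans if p[0] <= p[1]]
--     spans.sort(key=lambda p: p[0])
--     merged = []
--     cur = None
--     for lo, hi in spans:
--         if cur is None:
--             cur = (lo, hi)
--         elif lo <= cur[1] + 1:
--             if hi > cur[1]:
--                 cur = (cur[0], hi)
--         else:
--             merged.append(cur)
--             cur = (lo, hi)
--     if cur is not None:
--         merged.append(cur)
--
--     def covered(v):
--         lo, hi = 0, len(merged) - 1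
--         while lo <= hi:
--             mid = (lo + hi) // 2
--             a, b = merged[mid]
--             if v < a:
--                 hi = mid - 1
--             elif v > b:
--                 lo = mid + 1
--             else:
--                 return True
--         return False
--
--     return [t for t in neList if t and all(covered(v) for v in t)]
-- ===== Notes on version B (the rewrite author's own statement) =====
-- stated objective: faster
-- what changed: Instead of scanning every range of every rule for every value of every ticket, B builds the rule ranges once, sorts and merges them into disjoint intervals, and decides each value by binary search over the merged intervals.
-- outside the precondition, e.g. on removeInvalidTickets([[[5], [9, 9]]], [], [[0]]): A returns [], B raises IndexError; on removeInvalidTickets([[[5]]], [], [[]]): A returns [], B raises IndexError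
import Mathlib
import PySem

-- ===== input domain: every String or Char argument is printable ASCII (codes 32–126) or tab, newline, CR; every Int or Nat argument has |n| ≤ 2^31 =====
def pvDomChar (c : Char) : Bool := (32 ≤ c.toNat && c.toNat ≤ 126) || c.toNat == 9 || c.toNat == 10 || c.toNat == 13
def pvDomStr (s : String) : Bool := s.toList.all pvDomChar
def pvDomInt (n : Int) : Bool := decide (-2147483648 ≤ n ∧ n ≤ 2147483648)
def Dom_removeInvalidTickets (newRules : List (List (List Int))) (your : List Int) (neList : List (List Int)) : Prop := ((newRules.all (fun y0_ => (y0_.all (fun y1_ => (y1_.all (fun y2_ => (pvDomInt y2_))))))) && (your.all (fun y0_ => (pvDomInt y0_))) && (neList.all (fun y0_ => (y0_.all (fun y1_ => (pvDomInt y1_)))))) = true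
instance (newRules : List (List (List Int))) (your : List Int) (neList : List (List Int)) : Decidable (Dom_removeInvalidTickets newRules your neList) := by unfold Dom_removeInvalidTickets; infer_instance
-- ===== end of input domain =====

-- B replaces A's triple-nested per-value scan over every rule range by sorted merged intervals
-- built once and binary-searched per value (objective: faster).

-- ===== PORT A =====
-- rs[0] <= value <= rs[1]: Pre_ guarantees rs has ≥ 2 elements, so the chained indexing is total;
-- getD is exact there.
def rsHitA (rs : List Int) (value : Int) : Bool :=
  decide (rs.getD 0 0 ≤ value) && decide (value ≤ rs.getD 1 0)

def removeInvalidTickets (newRules : List (List (List Int))) (your : List Int) (neList : List (List Int)) : List (List Int) :=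
  neList.foldl (fun validTickets tick =>
    if tick ≠ [] then
      let valid := tick.foldl (fun valid value =>
        let validCount := newRules.foldl (fun cnt ru =>
          -- ruleSetOne = ru[0]; ruleSetTwo = ru[1]: dead bindings; Pre_ ensures they do not raise
          ru.foldl (fun cnt rs => if rsHitA rs value then cnt + 1 else cnt) cnt) (0 : Int)
        if validCount == 0 then false else valid) true
      if valid == true then validTickets ++ [tick] else validTickets
    else validTickets) []

-- ===== PORT B =====
-- (rs[0], rs[1]): Pre_ guarantees rs has ≥ 2 elements, so getD is exact.
def spanOfB (rs : List Int) : Int × Int := (rs.getD 0 0, rs.getD 1 0)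

def mergeStepB (st : List (Int × Int) × Option (Int × Int)) (p : Int × Int) : List (Int × Int) × Option (Int × Int) :=
  match st.2 with
  | none => (st.1, some p)
  | some c =>
    if p.1 ≤ c.2 + 1 then
      (if p.2 > c.2 then (st.1, some (c.1, p.2)) else st)
    else (st.1 ++ [c], some p)

def mergedB (newRules : List (List (List Int))) : List (Int × Int) :=
  let spans := (newRules.flatMap fun ru => ru.map spanOfB).filter (fun p => decide (p.1 ≤ p.2))
  let spans := PySem.List.sorted spans (fun p => p.1) false
  let st := spans.foldl mergeStepB ([], none)
  match st.2 with
  | none => st.1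
  | some c => st.1 ++ [c]

def bsB (m : List (Int × Int)) (v : Int) (lo hi : Int) : Bool :=
  if h : lo ≤ hi then
    let mid := PySem.Int.floordiv (lo + hi) 2
    let p := PySem.List.pyGetD m mid (0, 0)   -- m[mid]; 0 ≤ lo ≤ mid < len(m) at every call
    if v < p.1 then bsB m v lo (mid - 1)
    else if v > p.2 then bsB m v (mid + 1) hi
    else true
  else false
termination_by (hi + 1 - lo).toNat
decreasing_by
  · have := PySem.Int.floordiv_two_mid_bounds (lo := lo) (hi := hi) h; omega
  · have := PySem.Int.floordiv_two_mid_bounds (lo := lo) (hi := hi) h; omega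

def removeInvalidTickets_alt (newRules : List (List (List Int))) (your : List Int) (neList : List (List Int)) : List (List Int) :=
  let merged := mergedB newRules
  neList.filter (fun t => decide (t ≠ []) && t.all (fun v => bsB merged v 0 ((merged.length : Int) - 1)))

-- ===== PRECONDITION & SPEC =====
-- Pre_ excludes rule ranges shorter than two elements (A then raises IndexError or, when the
-- chained comparison short-circuits or no nonempty ticket is scanned, returns [] only by accident,
-- while B's upfront span construction raises), and rules with fewer than two range-lists when some
-- ticket is nonempty (A raises IndexError on ru[1] there).
def Pre_removeInvalidTickets (newRules : List (List (List Int))) (your : List Int) (neList : List (List Int)) : Prop :=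
  (∀ ru ∈ newRules, ∀ rs ∈ ru, 2 ≤ rs.length) ∧
  ((∃ t ∈ neList, t ≠ []) → ∀ ru ∈ newRules, 2 ≤ ru.length)
instance (newRules : List (List (List Int))) (your : List Int) (neList : List (List Int)) : Decidable (Pre_removeInvalidTickets newRules your neList) := by unfold Pre_removeInvalidTickets; infer_instance

def pvWitness_removeInvalidTickets : List (List (List Int)) × List Int × List (List Int) :=
  ([[[1, 3], [5, 7]]], [7], [[2], [4]])

def Spec_removeInvalidTickets (newRules : List (List (List Int))) (your : List Int) (neList : List (List Int)) (out : List (List Int)) : Prop := out = removeInvalidTickets_alt newRules your neList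
instance (newRules : List (List (List Int))) (your : List Int) (neList : List (List Int)) (out : List (List Int)) : Decidable (Spec_removeInvalidTickets newRules your neList out) := by unfold Spec_removeInvalidTickets; infer_instance

-- ===== CLAIM (what is proved, stated in full; the proofs are below) =====
def Claim_equal_removeInvalidTickets : Prop := ∀ (newRules : List (List (List Int))) (your : List Int) (neList : List (List Int)), Dom_removeInvalidTickets newRules your neList → Pre_removeInvalidTickets newRules your neList → Spec_removeInvalidTickets newRules your neList (removeInvalidTickets newRules your neList)

-- ===== LEMMAS AND PROOFS =====

-- "some rule range contains v", the common semantic core of both sides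
def covR (newRules : List (List (List Int))) (v : Int) : Bool :=
  newRules.any (fun ru => ru.any (fun rs => rsHitA rs v))

def covS (l : List (Int × Int)) (v : Int) : Prop := ∃ p ∈ l, p.1 ≤ v ∧ v ≤ p.2

-- ---- A characterised as a filter ----

theorem countFold_eq (l : List (List Int)) (v : Int) : ∀ c : Int,
    l.foldl (fun cnt rs => if rsHitA rs v then cnt + 1 else cnt) c = c + l.countP (fun rs => rsHitA rs v) := by
  induction l with
  | nil => intro c; simp
  | cons x xs ih =>
    intro c
    simp only [List.foldl_cons, List.countP_cons]
    by_cases h : rsHitA x v <;> simp [h, ih] <;> push_cast <;> ring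

theorem countA_eq_zero_iff (newRules : List (List (List Int))) (v : Int) :
    (newRules.foldl (fun cnt ru =>
      ru.foldl (fun cnt rs => if rsHitA rs v then cnt + 1 else cnt) cnt) (0 : Int)) = 0
    ↔ covR newRules v = false := by
  have h1 : ∀ (l : List (List (List Int))) (c : Int),
      l.foldl (fun cnt ru =>
        ru.foldl (fun cnt rs => if rsHitA rs v then cnt + 1 else cnt) cnt) c
      = c + (((l.map (fun ru => ru.countP (fun rs => rsHitA rs v))).sum : Nat) : Int) := by
    intro l
    induction l with
    | nil => intro c; simp
    | cons ru tl ih =>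
      intro c
      simp only [List.foldl_cons, List.map_cons, List.sum_cons]
      rw [countFold_eq, ih]
      push_cast
      ring
  rw [h1, zero_add]
  have h2 : (((newRules.map (fun ru => ru.countP (fun rs => rsHitA rs v))).sum : Nat) : Int) = 0
      ↔ ∀ ru ∈ newRules, ru.countP (fun rs => rsHitA rs v) = 0 := by
    rw [Int.natCast_eq_zero, List.sum_eq_zero_iff]
    constructor
    · intro h ru hru
      exact h _ (List.mem_map.mpr ⟨ru, hru, rfl⟩)
    · rintro h x hx
      rcases List.mem_map.mp hx with ⟨ru, hru, rfl⟩
      exact h ru hru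
  rw [h2]
  simp [covR, List.any_eq_false, List.countP_eq_zero]

theorem validFold_eq (tick : List Int) (g : Int → Bool) : ∀ b : Bool,
    tick.foldl (fun valid value => if g value then false else valid) b
    = (b && tick.all (fun v => !g v)) := by
  induction tick with
  | nil => intro b; simp
  | cons x xs ih =>
    intro b
    simp only [List.foldl_cons, List.all_cons]
    rw [ih]
    by_cases h : g x
    · simp [h]
    · simp [h, Bool.and_assoc]

theorem A_eq_filter (newRules : List (List (List Int))) (your : List Int) (neList : List (List Int)) :
    removeInvalidTickets newRules your neList
    = neList.filter (fun t => decide (t ≠ []) && t.all (fun v => covR newRules v)) := by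
  unfold removeInvalidTickets
  have step : ∀ (l : List (List Int)) (acc : List (List Int)),
      l.foldl (fun validTickets tick =>
        if tick ≠ [] then
          let valid := tick.foldl (fun valid value =>
            let validCount := newRules.foldl (fun cnt ru =>
              ru.foldl (fun cnt rs => if rsHitA rs value then cnt + 1 else cnt) cnt) (0 : Int)
            if validCount == 0 then false else valid) true
          if valid == true then validTickets ++ [tick] else validTickets
        else validTickets) acc
      = acc ++ l.filter (fun t => decide (t ≠ []) && t.all (fun v => covR newRules v)) := by
    intro l
    induction l with
    | nil => intro acc; simp
    | cons t tl ih =>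
      intro acc
      have hv : (t.foldl (fun valid value =>
          let validCount := newRules.foldl (fun cnt ru =>
            ru.foldl (fun cnt rs => if rsHitA rs value then cnt + 1 else cnt) cnt) (0 : Int)
          if validCount == 0 then false else valid) true)
          = t.all (fun v => covR newRules v) := by
        have : (fun (valid : Bool) (value : Int) =>
            let validCount := newRules.foldl (fun cnt ru =>
              ru.foldl (fun cnt rs => if rsHitA rs value then cnt + 1 else cnt) cnt) (0 : Int)
            if validCount == 0 then false else valid)
            = (fun valid value => if (newRules.foldl (fun cnt ru =>
              ru.foldl (fun cnt rs => if rsHitA rs value then cnt + 1 else cnt) cnt) (0 : Int)) == 0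
              then false else valid) := rfl
        rw [this, validFold_eq]
        simp only [Bool.true_and]
        have hfun : (fun value => !((newRules.foldl (fun cnt ru =>
              ru.foldl (fun cnt rs => if rsHitA rs value then cnt + 1 else cnt) cnt) (0 : Int)) == 0))
            = (fun v => covR newRules v) := by
          funext v
          rcases h : covR newRules v with _ | _
          · have := (countA_eq_zero_iff newRules v).mpr h
            simp [this]
          · have : ¬ (newRules.foldl (fun cnt ru =>
                ru.foldl (fun cnt rs => if rsHitA rs v then cnt + 1 else cnt) cnt) (0 : Int)) = 0 := by
              intro h0
              rw [countA_eq_zero_iff] at h0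
              simp [h0] at h
            simp [this, beq_iff_eq]
        rw [hfun]
      simp only [List.foldl_cons, List.filter_cons]
      by_cases ht : t = []
      · subst ht; simpa using ih acc
      · simp only [ht, if_pos (by simp [ht] : (t : List Int) ≠ [])]
        rw [hv]
        rcases hall : t.all (fun v => covR newRules v) with _ | _
        · simpa [ht, hall] using ih acc
        · simpa [ht] using ih (acc ++ [t])
  rw [step]
  simp

-- ---- B: the merged intervals are separated, nonempty, and cover exactly what the spans cover ----

def finishM (st : List (Int × Int) × Option (Int × Int)) : List (Int × Int) :=
  match st.2 with
  | none => st.1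
  | some c => st.1 ++ [c]

def SepInv (l : List (Int × Int)) : Prop :=
  l.Pairwise (fun p q => p.2 + 1 < q.1) ∧ ∀ p ∈ l, p.1 ≤ p.2

theorem merge_loop (spans : List (Int × Int)) : ∀ (done : List (Int × Int)) (c : Int × Int),
    SepInv done → c.1 ≤ c.2 → (∀ p ∈ done, p.2 + 1 < c.1) →
    spans.Pairwise (fun p q => p.1 ≤ q.1) → (∀ q ∈ spans, c.1 ≤ q.1) → (∀ q ∈ spans, q.1 ≤ q.2) →
    SepInv (finishM (spans.foldl mergeStepB (done, some c))) ∧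
    ∀ v, (covS (finishM (spans.foldl mergeStepB (done, some c))) v
          ↔ covS done v ∨ (c.1 ≤ v ∧ v ≤ c.2) ∨ covS spans v) := by
  induction spans with
  | nil =>
    intro done c hd hc hsep _ _ _
    constructor
    · exact ⟨List.pairwise_append.mpr ⟨hd.1, by simp, by simpa using hsep⟩,
        by intro p hp; rcases List.mem_append.mp hp with h | h
           · exact hd.2 p h
           · simp at h; subst h; exact hc⟩
    · intro v
      simp only [List.foldl_nil, finishM, covS]
      constructor
      · rintro ⟨p, hp, h1, h2⟩
        rcases List.mem_append.mp hp with h | h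
        · exact Or.inl ⟨p, h, h1, h2⟩
        · simp at h; subst h; exact Or.inr (Or.inl ⟨h1, h2⟩)
      · rintro (⟨p, hp, h1, h2⟩ | ⟨h1, h2⟩ | ⟨p, hp, _⟩)
        · exact ⟨p, List.mem_append.mpr (Or.inl hp), h1, h2⟩
        · exact ⟨c, List.mem_append.mpr (Or.inr (by simp)), h1, h2⟩
        · simp at hp
  | cons s tl ih =>
    intro done c hd hc hsep hsorted hge hne
    have hs1 : c.1 ≤ s.1 := hge s (by simp)
    have hs2 : s.1 ≤ s.2 := hne s (by simp)
    have htl_sorted : tl.Pairwise (fun p q => p.1 ≤ q.1) := hsorted.of_cons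
    have hhead : ∀ q ∈ tl, s.1 ≤ q.1 := by
      intro q hq; exact (List.pairwise_cons.mp hsorted).1 q hq
    simp only [List.foldl_cons, mergeStepB]
    by_cases hmerge : s.1 ≤ c.2 + 1
    · by_cases hgrow : s.2 > c.2
      · simp only [if_pos hmerge, if_pos hgrow]
        have h := ih done (c.1, s.2) hd (by dsimp; omega)
          (by intro p hp; exact hsep p hp)
          htl_sorted (by intro q hq; exact le_trans hs1 (hhead q hq))
          (by intro q hq; exact hne q (by simp [hq]))
        refine ⟨h.1, fun v => ?_⟩
        rw [h.2 v]
        constructor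
        · rintro (h1 | ⟨h1, h2⟩ | h1)
          · exact Or.inl h1
          · dsimp at h1 h2
            by_cases hvc : v ≤ c.2
            · exact Or.inr (Or.inl ⟨h1, hvc⟩)
            · exact Or.inr (Or.inr ⟨s, by simp, by omega, h2⟩)
          · exact Or.inr (Or.inr (by rcases h1 with ⟨p, hp, hh⟩; exact ⟨p, by simp [hp], hh⟩))
        · rintro (h1 | ⟨h1, h2⟩ | ⟨p, hp, h1, h2⟩)
          · exact Or.inl h1
          · exact Or.inr (Or.inl ⟨h1, by dsimp; omega⟩)
          · rcases List.mem_cons.mp hp with h | h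
            · subst h; exact Or.inr (Or.inl ⟨by dsimp; omega, h2⟩)
            · exact Or.inr (Or.inr ⟨p, h, h1, h2⟩)
      · simp only [if_pos hmerge, if_neg hgrow]
        have h := ih done c hd hc hsep htl_sorted
          (by intro q hq; exact le_trans hs1 (hhead q hq))
          (by intro q hq; exact hne q (by simp [hq]))
        refine ⟨h.1, fun v => ?_⟩
        rw [h.2 v]
        constructor
        · rintro (h1 | h1 | h1)
          · exact Or.inl h1
          · exact Or.inr (Or.inl h1)
          · exact Or.inr (Or.inr (by rcases h1 with ⟨p, hp, hh⟩; exact ⟨p, by simp [hp], hh⟩))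
        · rintro (h1 | h1 | ⟨p, hp, h1, h2⟩)
          · exact Or.inl h1
          · exact Or.inr (Or.inl h1)
          · rcases List.mem_cons.mp hp with h | h
            · subst h; exact Or.inr (Or.inl ⟨by omega, by omega⟩)
            · exact Or.inr (Or.inr ⟨p, h, h1, h2⟩)
    · simp only [if_neg hmerge]
      have hdone' : SepInv (done ++ [c]) := by
        refine ⟨List.pairwise_append.mpr ⟨hd.1, by simp, by simpa using hsep⟩, ?_⟩
        intro p hp; rcases List.mem_append.mp hp with h | h
        · exact hd.2 p h
        · simp at h; subst h; exact hc
      have h := ih (done ++ [c]) s hdone' hs2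
        (by intro p hp
            rcases List.mem_append.mp hp with h | h
            · have := hsep p h; omega
            · simp at h; subst h; omega)
        htl_sorted hhead
        (by intro q hq; exact hne q (by simp [hq]))
      refine ⟨h.1, fun v => ?_⟩
      rw [h.2 v]
      constructor
      · rintro (h1 | ⟨h1, h2⟩ | h1)
        · rcases h1 with ⟨p, hp, hh⟩
          rcases List.mem_append.mp hp with hm | hm
          · exact Or.inl ⟨p, hm, hh⟩
          · simp at hm; subst hm; exact Or.inr (Or.inl hh)
        · exact Or.inr (Or.inr ⟨s, by simp, h1, h2⟩)
        · exact Or.inr (Or.inr (by rcases h1 with ⟨p, hp, hh⟩; exact ⟨p, by simp [hp], hh⟩))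
      · rintro (⟨p, hp, hh⟩ | ⟨h1, h2⟩ | ⟨p, hp, h1, h2⟩)
        · exact Or.inl ⟨p, by simp [hp], hh⟩
        · exact Or.inl ⟨c, by simp, h1, h2⟩
        · rcases List.mem_cons.mp hp with hm | hm
          · subst hm; exact Or.inr (Or.inl ⟨h1, h2⟩)
          · exact Or.inr (Or.inr ⟨p, hm, h1, h2⟩)

theorem covS_nil (v : Int) : ¬ covS [] v := by simp [covS]

theorem covS_cons (s : Int × Int) (tl : List (Int × Int)) (v : Int) :
    covS (s :: tl) v ↔ (s.1 ≤ v ∧ v ≤ s.2) ∨ covS tl v := by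
  simp only [covS, List.mem_cons]
  constructor
  · rintro ⟨p, hp | hp, hh⟩
    · subst hp; exact Or.inl hh
    · exact Or.inr ⟨p, hp, hh⟩
  · rintro (hh | ⟨p, hp, hh⟩)
    · exact ⟨s, Or.inl rfl, hh⟩
    · exact ⟨p, Or.inr hp, hh⟩

theorem mergedB_eq (newRules : List (List (List Int))) :
    mergedB newRules = finishM ((PySem.List.sorted
      ((newRules.flatMap fun ru => ru.map spanOfB).filter (fun p => decide (p.1 ≤ p.2)))
      (fun p => p.1) false).foldl mergeStepB ([], none)) := rfl

theorem mergedB_spec (newRules : List (List (List Int))) :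
    SepInv (mergedB newRules) ∧ ∀ v, (covS (mergedB newRules) v ↔ covR newRules v = true) := by
  rw [mergedB_eq]
  set spans0 := (newRules.flatMap fun ru => ru.map spanOfB).filter (fun p => decide (p.1 ≤ p.2)) with hspans0
  have hcov0 : ∀ v, covS spans0 v ↔ covR newRules v = true := by
    intro v
    constructor
    · rintro ⟨p, hp, h1, h2⟩
      rw [hspans0, List.mem_filter] at hp
      rcases List.mem_flatMap.mp hp.1 with ⟨ru, hru, hpm⟩
      rcases List.mem_map.mp hpm with ⟨rs, hrs, hrsp⟩
      simp only [covR, List.any_eq_true]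
      refine ⟨ru, hru, rs, hrs, ?_⟩
      subst hrsp
      simp only [spanOfB] at h1 h2
      simp only [rsHitA, Bool.and_eq_true, decide_eq_true_eq]
      exact ⟨h1, h2⟩
    · intro h
      simp only [covR, List.any_eq_true] at h
      rcases h with ⟨ru, hru, rs, hrs, hhit⟩
      simp only [rsHitA, Bool.and_eq_true, decide_eq_true_eq] at hhit
      refine ⟨spanOfB rs, ?_, hhit.1, hhit.2⟩
      rw [hspans0, List.mem_filter]
      refine ⟨List.mem_flatMap.mpr ⟨ru, hru, List.mem_map.mpr ⟨rs, hrs, rfl⟩⟩, ?_⟩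
      simp only [spanOfB, decide_eq_true_eq]
      omega
  set ss := PySem.List.sorted spans0 (fun p => p.1) false with hss
  have hmem : ∀ p, p ∈ ss ↔ p ∈ spans0 := by
    intro p; rw [hss]; exact PySem.List.mem_sorted _ _ _ _
  have hne : ∀ q ∈ ss, q.1 ≤ q.2 := by
    intro q hq
    have := (hmem q).mp hq
    rw [hspans0, List.mem_filter] at this
    simpa using this.2
  have hsorted : ss.Pairwise (fun p q => p.1 ≤ q.1) := by
    rw [hss]; exact PySem.List.sorted_pairwise _ _
  have hcovss : ∀ v, covS ss v ↔ covS spans0 v := by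
    intro v
    constructor <;> rintro ⟨p, hp, hh⟩
    · exact ⟨p, (hmem p).mp hp, hh⟩
    · exact ⟨p, (hmem p).mpr hp, hh⟩
  rcases hssc : ss with _ | ⟨s, tl⟩
  · constructor
    · exact ⟨by simp [finishM], by simp [finishM]⟩
    · intro v
      rw [← hcov0 v, ← hcovss v, hssc]
      simp [finishM, covS]
  · rw [List.foldl_cons]
    have hstep : mergeStepB ([], none) s = ([], some s) := rfl
    rw [hstep]
    rw [hssc] at hsorted hne
    have h := merge_loop tl [] s ⟨List.Pairwise.nil, fun p hp => absurd hp (List.not_mem_nil)⟩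
      (hne s (by simp)) (fun p hp => absurd hp (List.not_mem_nil))
      hsorted.of_cons
      (by intro q hq; exact (List.pairwise_cons.mp hsorted).1 q hq)
      (by intro q hq; exact hne q (by simp [hq]))
    refine ⟨h.1, fun v => ?_⟩
    rw [← hcov0 v, ← hcovss v, hssc]
    rw [h.2 v, covS_cons]
    constructor
    · rintro (h1 | h1 | h1)
      · exact absurd h1 (covS_nil v)
      · exact Or.inl h1
      · exact Or.inr h1
    · rintro (h1 | h1)
      · exact Or.inr (Or.inl h1)
      · exact Or.inr (Or.inr h1)

-- index form of separation: strictly increasing, disjoint intervals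
theorem sep_getElem (m : List (Int × Int)) (h : SepInv m) :
    ∀ i j (hi : i < m.length) (hj : j < m.length), i < j → m[i].2 + 1 < m[j].1 :=
  fun i j hi hj hij => (List.pairwise_iff_getElem.mp h.1) i j hi hj hij

theorem bs_correct (m : List (Int × Int)) (hm : SepInv m) (v : Int) :
    ∀ (n : Nat) (lo hi : Int), (hi + 1 - lo).toNat = n → 0 ≤ lo → hi < (m.length : Int) →
    (bsB m v lo hi = true ↔
      ∃ i : Nat, lo ≤ (i : Int) ∧ (i : Int) ≤ hi ∧ (m.getD i (0, 0)).1 ≤ v ∧ v ≤ (m.getD i (0, 0)).2) := by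
  intro n
  induction n using Nat.strong_induction_on with
  | _ n ihn =>
    intro lo hi hn hlo hhi
    rw [bsB]
    by_cases hle : lo ≤ hi
    · have hmid := PySem.Int.floordiv_two_mid_bounds (lo := lo) (hi := hi) hle
      set mid := PySem.Int.floordiv (lo + hi) 2 with hmiddef
      have hmid0 : 0 ≤ mid := le_trans hlo hmid.1
      have hmidlen : mid < (m.length : Int) := lt_of_le_of_lt hmid.2 hhi
      have hmidnat : mid.toNat < m.length := by omega
      have hget : PySem.List.pyGetD m mid (0, 0) = m[mid.toNat] :=
        PySem.List.pyGetD_eq_getElem m (0, 0) hmid0 (by simpa using hmidlen)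
      simp only [hle, dif_pos, hget]
      have hfstmono : ∀ i : Nat, (hi' : i < m.length) → mid.toNat < i → m[mid.toNat].1 < m[i].1 := by
        intro i hi' hlt
        have h1 := sep_getElem m hm mid.toNat i hmidnat hi' hlt
        have h2 := hm.2 m[mid.toNat] (by exact List.getElem_mem _)
        omega
      have hsndmono : ∀ i : Nat, (hi' : i < m.length) → i < mid.toNat → m[i].2 < m[mid.toNat].2 := by
        intro i hi' hlt
        have h1 := sep_getElem m hm i mid.toNat hi' hmidnat hlt
        have h2 := hm.2 m[mid.toNat] (by exact List.getElem_mem _)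
        omega
      by_cases h1 : v < m[mid.toNat].1
      · simp only [if_pos h1]
        rw [ihn (mid - 1 + 1 - lo).toNat (by omega) lo (mid - 1) rfl hlo (by omega)]
        constructor
        · rintro ⟨i, ha, hb, hc⟩; exact ⟨i, ha, by omega, hc⟩
        · rintro ⟨i, ha, hb, hc, hd⟩
          refine ⟨i, ha, ?_, hc, hd⟩
          by_contra hcon
          have hmidle : mid.toNat ≤ i := by omega
          have hilen : i < m.length := by omega
          have : m[mid.toNat].1 ≤ (m.getD i (0,0)).1 := by
            rcases Nat.eq_or_lt_of_le hmidle with he | hlt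
            · subst he
              rw [List.getD_eq_getElem _ _ hilen]
            · rw [List.getD_eq_getElem _ _ hilen]
              exact le_of_lt (hfstmono i hilen hlt)
          omega
      · by_cases h2 : v > m[mid.toNat].2
        · simp only [if_neg h1, if_pos h2]
          rw [ihn (hi + 1 - (mid + 1)).toNat (by omega) (mid + 1) hi rfl (by omega) hhi]
          constructor
          · rintro ⟨i, ha, hb, hc⟩; exact ⟨i, by omega, hb, hc⟩
          · rintro ⟨i, ha, hb, hc, hd⟩
            refine ⟨i, ?_, hb, hc, hd⟩
            by_contra hcon
            have hile : i ≤ mid.toNat := by omega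
            have hilen : i < m.length := by omega
            have : (m.getD i (0,0)).2 ≤ m[mid.toNat].2 := by
              rcases Nat.eq_or_lt_of_le hile with he | hlt
              · subst he
                rw [List.getD_eq_getElem _ _ hilen]
              · rw [List.getD_eq_getElem _ _ hilen]
                exact le_of_lt (hsndmono i hilen hlt)
            omega
        · simp only [if_neg h1, if_neg h2]
          constructor
          · intro _
            exact ⟨mid.toNat, by omega, by omega,
              by rw [List.getD_eq_getElem _ _ hmidnat]; omega,
              by rw [List.getD_eq_getElem _ _ hmidnat]; omega⟩
          · intro _; trivial
    · simp only [hle, dif_neg, not_false_iff]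
      constructor
      · intro h; exact absurd h (by simp)
      · rintro ⟨i, ha, hb, _⟩; omega

theorem bs_full (m : List (Int × Int)) (hm : SepInv m) (v : Int) :
    bsB m v 0 ((m.length : Int) - 1) = true ↔ covS m v := by
  rw [bs_correct m hm v ((m.length : Int) - 1 + 1 - 0).toNat 0 ((m.length : Int) - 1) rfl le_rfl (by omega)]
  constructor
  · rintro ⟨i, ha, hb, hc, hd⟩
    have hilen : i < m.length := by omega
    refine ⟨m[i], List.getElem_mem _, ?_, ?_⟩
    · rw [List.getD_eq_getElem _ _ hilen] at hc; exact hc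
    · rw [List.getD_eq_getElem _ _ hilen] at hd; exact hd
  · rintro ⟨p, hp, h1, h2⟩
    rcases List.getElem_of_mem hp with ⟨i, hilen, hip⟩
    exact ⟨i, by omega, by omega, by rw [List.getD_eq_getElem _ _ hilen, hip]; exact h1,
      by rw [List.getD_eq_getElem _ _ hilen, hip]; exact h2⟩

theorem bs_eq_covR (newRules : List (List (List Int))) (v : Int) :
    bsB (mergedB newRules) v 0 (((mergedB newRules).length : Int) - 1) = covR newRules v := by
  rcases mergedB_spec newRules with ⟨hinv, hcov⟩
  rcases hb : bsB (mergedB newRules) v 0 (((mergedB newRules).length : Int) - 1) with _ | _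
  · rcases hc : covR newRules v with _ | _
    · rfl
    · exfalso
      have := (bs_full _ hinv v).mpr ((hcov v).mpr hc)
      rw [hb] at this; exact absurd this (by simp)
  · exact ((hcov v).mp ((bs_full _ hinv v).mp hb)).symm

-- ===== VERDICT (by name: the statement is the Claim_ definition above) =====
theorem removeInvalidTickets_spec : Claim_equal_removeInvalidTickets := by
  intro newRules your neList _ _
  unfold Spec_removeInvalidTickets
  rw [A_eq_filter]
  unfold removeInvalidTickets_alt
  have hall : ∀ t : List Int,
      t.all (fun v => bsB (mergedB newRules) v 0 (((mergedB newRules).length : Int) - 1))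
      = t.all (fun v => covR newRules v) := by
    intro t
    induction t with
    | nil => rfl
    | cons x xs ih => simp only [List.all_cons, ih, bs_eq_covR]
  apply List.filter_congr
  intro t _
  rw [hall t]
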